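-- pv_equiv track=rewrite | github.com/miikaTheCoder/secure-vibe | src/patcher/validators.py | _check_consistent_indentation
-- ===== SOURCE A (Python) =====
-- from typing import List, Optional, Tuple
--
-- def _check_consistent_indentation(lines: List[str]) -> bool:
--     """Check that indentation is consistent throughout."""
--     indents = []
--     for line in lines:
--         stripped = line.lstrip()
--         if stripped and not stripped.startswith("#"):
--             indent = len(line) - len(stripped)
--             if indent > 0:
--                 indents.append(indent)
--
--     if not indents:
--         return True
--
--     # Find the most common indent step
--     unique_indents = sorted(set(indents))
--     if len(unique_indents) < 2:
--         return True
--
--     # Check that indents are multiples of a common step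
--     min_indent = unique_indents[0]
--     if min_indent == 0:
--         min_indent = unique_indents[1] if len(unique_indents) > 1 else 4
--
--     for indent in unique_indents:
--         if indent % min_indent != 0:
--             return False
--
--     return True
-- ===== SOURCE B (Python) =====
-- from typing import List
--
--
-- def _gcd(a, b):
--     while b:
--         a, b = b, a % b
--     return a
--
--
-- def _check_consistent_indentation(lines: List[str]) -> bool:
--     """Check that indentation is consistent throughout."""
--     # Single pass: keep only a running gcd and a running minimum of the
--     # positive indent widths; no list, no set, no sort.
--     g = 0
--     m = None
--     for line in lines:
--         stripped = line.lstrip()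
--         if stripped and not stripped.startswith("#"):
--             indent = len(line) - len(stripped)
--             if indent > 0:
--                 g = _gcd(g, indent)
--                 if m is None or indent < m:
--                     m = indent
--     return m is None or g == m
-- ===== Notes on version B (the rewrite author's own statement) =====
-- stated objective: alternative
-- what changed: Instead of collecting all indents into a list, deduplicating, sorting and scanning for divisibility by the minimum, B keeps only a running gcd and a running minimum in one pass and returns gcd == min (all indents are multiples of the minimum iff their gcd equals the minimum).
import Mathlib
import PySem

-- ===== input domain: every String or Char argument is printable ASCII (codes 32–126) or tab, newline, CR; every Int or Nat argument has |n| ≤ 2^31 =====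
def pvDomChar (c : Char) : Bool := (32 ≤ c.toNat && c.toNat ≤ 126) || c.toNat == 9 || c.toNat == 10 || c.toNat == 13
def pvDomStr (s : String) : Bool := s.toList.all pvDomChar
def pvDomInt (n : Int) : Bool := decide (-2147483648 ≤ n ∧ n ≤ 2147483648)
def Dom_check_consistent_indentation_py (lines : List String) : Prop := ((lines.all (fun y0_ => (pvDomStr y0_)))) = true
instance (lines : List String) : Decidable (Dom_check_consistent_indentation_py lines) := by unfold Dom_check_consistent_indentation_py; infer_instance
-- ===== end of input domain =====

-- B replaces A's collect/dedup/sort/scan pipeline by a single pass keeping only a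
-- running gcd and a running minimum of the positive indents, returning gcd == min.

-- ===== PORT A =====
-- loop body of A's collection loop: append each positive indent of a non-blank non-comment line
def stepA (acc : List Int) (line : String) : List Int :=
  if !(PySem.Str.lstrip line).toList.isEmpty && !PySem.Str.startswith (PySem.Str.lstrip line) "#" then
    if 0 < PySem.Str.len line - PySem.Str.len (PySem.Str.lstrip line) then
      acc ++ [PySem.Str.len line - PySem.Str.len (PySem.Str.lstrip line)]
    else acc
  else acc

def check_consistent_indentation_py (lines : List String) : Bool :=
  let indents := lines.foldl stepA []
  if indents.isEmpty then true
  else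
    let unique_indents := PySem.List.sorted (PySem.Set.ofList indents) (fun x => x) false
    if unique_indents.length < 2 then true
    else
      let min0 := PySem.List.pyGetD unique_indents 0 0   -- unique_indents[0]; in range: length ≥ 2
      let min_indent :=
        if min0 = 0 then
          (if 1 < unique_indents.length then PySem.List.pyGetD unique_indents 1 0 else 4)
        else min0
      unique_indents.all (fun indent => PySem.Int.mod indent min_indent == 0)

-- ===== PORT B =====
-- _gcd: 'while b: a, b = b, a % b; return a'
def gcdLoop (a b : Int) : Int :=
  if h : b ≠ 0 then gcdLoop b (PySem.Int.mod a b) else a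
termination_by b.natAbs
decreasing_by
  rcases lt_or_gt_of_ne h with hb | hb
  · have := PySem.Int.mod_neg_bounds a hb; omega
  · have h1 := PySem.Int.mod_nonneg a hb; have h2 := PySem.Int.mod_lt a hb; omega

-- running-minimum update: 'if m is None or indent < m: m = indent'
def minStep (m : Option Int) (x : Int) : Option Int :=
  match m with
  | none => some x
  | some mv => if x < mv then some x else some mv

-- loop body of B's single pass over the lines
def stepB (gm : Int × Option Int) (line : String) : Int × Option Int :=
  if !(PySem.Str.lstrip line).toList.isEmpty && !PySem.Str.startswith (PySem.Str.lstrip line) "#" then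
    if 0 < PySem.Str.len line - PySem.Str.len (PySem.Str.lstrip line) then
      (gcdLoop gm.1 (PySem.Str.len line - PySem.Str.len (PySem.Str.lstrip line)),
       minStep gm.2 (PySem.Str.len line - PySem.Str.len (PySem.Str.lstrip line)))
    else gm
  else gm

def check_consistent_indentation_py_alt (lines : List String) : Bool :=
  let gm := lines.foldl stepB (0, none)
  match gm.2 with
  | none => true
  | some m => gm.1 == m

-- ===== PRECONDITION & SPEC =====
def Spec_check_consistent_indentation_py (lines : List String) (out : Bool) : Prop := out = check_consistent_indentation_py_alt lines
instance (lines : List String) (out : Bool) : Decidable (Spec_check_consistent_indentation_py lines out) := by unfold Spec_check_consistent_indentation_py; infer_instance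

-- ===== CLAIM (what is proved, stated in full; the proofs are below) =====
def Claim_equal_check_consistent_indentation_py : Prop := ∀ (lines : List String), Dom_check_consistent_indentation_py lines → Spec_check_consistent_indentation_py lines (check_consistent_indentation_py lines)

-- ===== LEMMAS AND PROOFS =====

-- each step of A's collection loop appends to its accumulator
theorem stepA_eq (acc : List Int) (line : String) : stepA acc line = acc ++ stepA [] line := by
  unfold stepA; split_ifs <;> simp

-- each step of B's pass folds gcdLoop/minStep over what A's step collects
theorem stepB_eq (gm : Int × Option Int) (line : String) :
    stepB gm line = ((stepA [] line).foldl gcdLoop gm.1, (stepA [] line).foldl minStep gm.2) := by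
  unfold stepA stepB; split_ifs <;> simp

theorem foldl_stepA_append (lines : List String) (acc : List Int) :
    lines.foldl stepA acc = acc ++ lines.foldl stepA [] := by
  induction lines generalizing acc with
  | nil => simp
  | cons l t ih =>
    simp only [List.foldl_cons]
    rw [ih (stepA acc l), ih (stepA [] l), stepA_eq acc l, List.append_assoc]

-- every collected indent is positive
theorem foldl_stepA_pos (lines : List String) (acc : List Int) (h : ∀ x ∈ acc, 0 < x) :
    ∀ x ∈ lines.foldl stepA acc, 0 < x := by
  induction lines generalizing acc with
  | nil => exact h
  | cons l t ih =>
    refine ih _ ?_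
    unfold stepA
    split_ifs with h1 h2
    · intro x hx
      rcases List.mem_append.mp hx with hx | hx
      · exact h x hx
      · rw [List.mem_singleton.mp hx]; exact h2
    · exact h
    · exact h

-- B's pass computes the gcd-fold and the min-fold of A's collected list
theorem foldl_stepB_eq (lines : List String) (g : Int) (m : Option Int) :
    lines.foldl stepB (g, m) =
      ((lines.foldl stepA []).foldl gcdLoop g, (lines.foldl stepA []).foldl minStep m) := by
  induction lines generalizing g m with
  | nil => simp
  | cons l t ih =>
    rw [List.foldl_cons, List.foldl_cons, foldl_stepA_append t (stepA [] l),
      stepB_eq (g, m) l, ih, List.foldl_append, List.foldl_append]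

theorem gcdLoop_nonneg (a b : Int) (ha : 0 ≤ a) (hb : 0 ≤ b) : 0 ≤ gcdLoop a b := by
  induction a, b using gcdLoop.induct with
  | case1 a b h ih =>
    rw [gcdLoop, dif_pos h]
    exact ih hb (PySem.Int.mod_nonneg a (by omega))
  | case2 a b h => rw [gcdLoop, dif_neg h]; exact ha

theorem gcdLoop_dvd (a b : Int) : gcdLoop a b ∣ a ∧ gcdLoop a b ∣ b := by
  induction a, b using gcdLoop.induct with
  | case1 a b h ih =>
    rw [gcdLoop, dif_pos h]
    obtain ⟨h1, h2⟩ := ih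
    refine ⟨?_, h1⟩
    have := PySem.Int.floordiv_mul_add_mod a b
    calc gcdLoop b (PySem.Int.mod a b) ∣ PySem.Int.floordiv a b * b + PySem.Int.mod a b :=
          Dvd.dvd.add (Dvd.dvd.mul_left h1 _) h2
      _ = a := this
  | case2 a b h =>
    rw [gcdLoop, dif_neg h]
    simp at h; simp [h]

theorem dvd_gcdLoop (d a b : Int) (hda : d ∣ a) (hdb : d ∣ b) : d ∣ gcdLoop a b := by
  induction a, b using gcdLoop.induct with
  | case1 a b h ih =>
    rw [gcdLoop, dif_pos h]
    refine ih hdb ?_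
    have := PySem.Int.floordiv_mul_add_mod a b
    have : PySem.Int.mod a b = a - PySem.Int.floordiv a b * b := by omega
    rw [this]
    exact Dvd.dvd.sub hda (Dvd.dvd.mul_left hdb _)
  | case2 a b h => rw [gcdLoop, dif_neg h]; exact hda

theorem gcdFold_nonneg (l : List Int) (g : Int) (hg : 0 ≤ g) (hl : ∀ x ∈ l, 0 ≤ x) :
    0 ≤ l.foldl gcdLoop g := by
  induction l generalizing g with
  | nil => exact hg
  | cons a t ih =>
    exact ih _ (gcdLoop_nonneg g a hg (hl a (by simp))) (fun x hx => hl x (by simp [hx]))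

theorem gcdFold_dvd (l : List Int) (g : Int) :
    l.foldl gcdLoop g ∣ g ∧ ∀ x ∈ l, l.foldl gcdLoop g ∣ x := by
  induction l generalizing g with
  | nil => simp
  | cons a t ih =>
    obtain ⟨h1, h2⟩ := ih (gcdLoop g a)
    simp only [List.foldl_cons]
    refine ⟨h1.trans (gcdLoop_dvd g a).1, ?_⟩
    intro x hx
    rcases List.mem_cons.mp hx with rfl | hx
    · exact h1.trans (gcdLoop_dvd g x).2
    · exact h2 x hx

theorem dvd_gcdFold (l : List Int) (g d : Int) (hg : d ∣ g) (hl : ∀ x ∈ l, d ∣ x) :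
    d ∣ l.foldl gcdLoop g := by
  induction l generalizing g with
  | nil => exact hg
  | cons a t ih =>
    exact ih _ (dvd_gcdLoop d g a hg (hl a (by simp))) (fun x hx => hl x (by simp [hx]))

-- the min-fold returns the minimum: a member that bounds everything
theorem minFold_some (l : List Int) (v : Int) :
    ∃ w, l.foldl minStep (some v) = some w ∧ (w = v ∨ w ∈ l) ∧ w ≤ v ∧ ∀ x ∈ l, w ≤ x := by
  induction l generalizing v with
  | nil => exact ⟨v, rfl, Or.inl rfl, le_refl v, by simp⟩
  | cons a t ih =>
    simp only [List.foldl_cons, minStep]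
    split_ifs with h
    · obtain ⟨w, hw, hmem, hle, hall⟩ := ih a
      refine ⟨w, hw, Or.inr ?_, le_trans hle (le_of_lt h), ?_⟩
      · rcases hmem with rfl | hm
        · exact List.mem_cons_self
        · exact List.mem_cons_of_mem _ hm
      · intro x hx
        rcases List.mem_cons.mp hx with rfl | hx
        · exact hle
        · exact hall x hx
    · obtain ⟨w, hw, hmem, hle, hall⟩ := ih v
      refine ⟨w, hw, ?_, hle, ?_⟩
      · rcases hmem with rfl | hm
        · exact Or.inl rfl
        · exact Or.inr (List.mem_cons_of_mem _ hm)
      · intro x hx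
        rcases List.mem_cons.mp hx with rfl | hx
        · exact le_trans hle (not_lt.mp h)
        · exact hall x hx

-- core fact: for a list of positives, the sorted-unique divisibility scan agrees with gcd == min
theorem post_eq (l : List Int) (hpos : ∀ x ∈ l, 0 < x) :
    (if l.isEmpty then true else
      if (PySem.List.sorted (PySem.Set.ofList l) (fun x => x) false).length < 2 then true else
        (PySem.List.sorted (PySem.Set.ofList l) (fun x => x) false).all (fun indent =>
          PySem.Int.mod indent
            (if PySem.List.pyGetD (PySem.List.sorted (PySem.Set.ofList l) (fun x => x) false) 0 0 = 0 then
               (if 1 < (PySem.List.sorted (PySem.Set.ofList l) (fun x => x) false).length then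
                  PySem.List.pyGetD (PySem.List.sorted (PySem.Set.ofList l) (fun x => x) false) 1 0 else 4)
             else PySem.List.pyGetD (PySem.List.sorted (PySem.Set.ofList l) (fun x => x) false) 0 0) == 0)) =
    (match l.foldl minStep none with
      | none => true
      | some m => l.foldl gcdLoop 0 == m) := by
  cases l with
  | nil => rfl
  | cons a t =>
    obtain ⟨w, hw, hwmem', hwlea, hwall'⟩ := minFold_some t a
    have hfold : (a :: t).foldl minStep none = some w := by
      rw [List.foldl_cons]; exact hw
    have hwmem : w ∈ a :: t := by
      rcases hwmem' with rfl | hm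
      · exact List.mem_cons_self
      · exact List.mem_cons_of_mem _ hm
    have hwall : ∀ x ∈ a :: t, w ≤ x := by
      intro x hx
      rcases List.mem_cons.mp hx with rfl | hx
      · exact hwlea
      · exact hwall' x hx
    have hwpos : 0 < w := hpos w hwmem
    have hGnonneg : 0 ≤ (a :: t).foldl gcdLoop 0 :=
      gcdFold_nonneg _ 0 le_rfl (fun x hx => le_of_lt (hpos x hx))
    have hGdvd : ∀ x ∈ a :: t, (a :: t).foldl gcdLoop 0 ∣ x := (gcdFold_dvd _ 0).2
    have key : ((a :: t).foldl gcdLoop 0 = w) ↔ ∀ x ∈ a :: t, w ∣ x := by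
      constructor
      · intro e; rw [← e]; exact hGdvd
      · intro hall
        exact Int.dvd_antisymm hGnonneg (le_of_lt hwpos) (hGdvd w hwmem)
          (dvd_gcdFold _ 0 w (dvd_zero w) hall)
    obtain ⟨hh, t', hu⟩ : ∃ hh t',
        PySem.List.sorted (PySem.Set.ofList (a :: t)) (fun x : Int => x) false = hh :: t' := by
      rcases e : PySem.List.sorted (PySem.Set.ofList (a :: t)) (fun x : Int => x) false with _ | ⟨hh, t'⟩
      · rw [PySem.List.sorted_eq_nil_iff] at e
        have : a ∈ PySem.Set.ofList (a :: t) := (PySem.Set.mem_ofList _ a).mpr List.mem_cons_self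
        simp [e] at this
      · exact ⟨hh, t', rfl⟩
    have humem : ∀ x : Int, x ∈ hh :: t' ↔ x ∈ a :: t := by
      intro x
      rw [← hu, PySem.List.mem_sorted, PySem.Set.mem_ofList]
    have hhmem : hh ∈ a :: t := (humem hh).mp List.mem_cons_self
    have hhle : ∀ y ∈ a :: t, hh ≤ y := fun y hy =>
      PySem.List.key_head_sorted_le _ _ hu y ((PySem.Set.mem_ofList _ y).mpr hy)
    have hhw : hh = w := le_antisymm (hhle w hwmem) (hwall hh hhmem)
    subst hhw
    rw [hfold, hu]
    simp only [List.isEmpty_cons, Bool.false_eq_true, if_false]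
    by_cases hlen : (hh :: t').length < 2
    · rw [if_pos hlen]
      have ht' : t' = [] := by
        cases t' with
        | nil => rfl
        | cons b l => simp only [List.length_cons] at hlen; omega
      subst ht'
      have hallh : ∀ x ∈ a :: t, x = hh := by
        intro x hx
        have := (humem x).mpr hx
        simpa using this
      symm
      rw [beq_iff_eq]
      apply key.mpr
      intro x hx
      rw [hallh x hx]
    · rw [if_neg hlen]
      have hmin0 : PySem.List.pyGetD (hh :: t') 0 0 = hh := by
        simp [PySem.List.pyGetD, PySem.List.pyGet?, PySem.List.pyIdx?]
      rw [hmin0, if_neg (by omega : ¬ hh = (0 : Int))]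
      rw [Bool.eq_iff_iff]
      simp only [List.all_eq_true, beq_iff_eq, PySem.Int.mod_eq_zero_iff_dvd]
      constructor
      · intro hall
        exact key.mpr (fun x hx => hall x ((humem x).mpr hx))
      · intro hGw x hx
        exact key.mp hGw x ((humem x).mp hx)

-- ===== VERDICT (by name: the statement is the Claim_ definition above) =====
theorem check_consistent_indentation_py_spec : Claim_equal_check_consistent_indentation_py := by
  intro lines _
  unfold Spec_check_consistent_indentation_py
  unfold check_consistent_indentation_py check_consistent_indentation_py_alt
  rw [foldl_stepB_eq]
  exact post_eq (lines.foldl stepA []) (foldl_stepA_pos lines [] (by simp))
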